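-- pv_equiv track=rewrite | github.com/DayChan/lc | Pythoncode/85.最大矩形.py | getdp
-- ===== SOURCE A (Python) =====
-- def getdp(matrix):
--     dp = {}
--     for i in range(len(matrix)):
--         for j in range(len(matrix[0])):
--             if j == 0:
--                 count = 0 #init
--             if matrix[i][j] == "0":
--                 count = 0 #reset
--             else:
--                 count += 1 #increase
--             dp[(i, j)] = count
--     return dp
-- ===== SOURCE B (Python) =====
-- def getdp(matrix):
--     dp = {}
--     if matrix:
--         m = len(matrix[0])
--         for i in range(len(matrix)):
--             row = matrix[i]
--             for j in range(m):
--                 k = j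
--                 while k >= 0 and row[k] != "0":
--                     k -= 1
--                 dp[(i, j)] = j - k
--     return dp
-- ===== Notes on version B (the rewrite author's own statement) =====
-- stated objective: alternative
-- what changed: Replaces A's running DP counter threaded through each row with an independent per-cell backward scan: for each (i,j) it walks left from column j until the first '0' (or the row start) and stores the scanned length, so no loop-carried state remains.
import Mathlib
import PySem

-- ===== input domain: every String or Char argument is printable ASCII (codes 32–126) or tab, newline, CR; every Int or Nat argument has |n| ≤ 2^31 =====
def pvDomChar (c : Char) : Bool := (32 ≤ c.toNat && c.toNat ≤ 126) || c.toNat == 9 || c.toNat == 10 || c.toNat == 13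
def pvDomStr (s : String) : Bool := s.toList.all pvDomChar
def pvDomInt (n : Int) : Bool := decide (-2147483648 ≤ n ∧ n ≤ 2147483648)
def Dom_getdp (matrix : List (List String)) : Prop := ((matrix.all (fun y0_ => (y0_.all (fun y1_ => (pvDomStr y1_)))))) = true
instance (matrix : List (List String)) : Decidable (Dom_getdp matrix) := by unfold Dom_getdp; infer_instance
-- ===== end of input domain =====

-- B replaces A's row-running DP counter with an independent per-cell backward scan (same results, alternative algorithm).


-- ===== PORT A =====
-- A's inner-loop body: update the running counter, record dp[(i,j)] = count.
-- dict keys (i,j) are all distinct, so dict insertion = appending (i, j, count) to the list.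
def stepA (matrix : List (List String)) (i : Int) (st : List (Int × Int × Int) × Int) (j : Int) :
    List (Int × Int × Int) × Int :=
  let count := if j = 0 then 0 else st.2
  let count :=
    if PySem.List.pyGetD (PySem.List.pyGetD matrix i []) j "" = "0" then 0 else count + 1
  (st.1 ++ [(i, j, count)], count)

def getdp (matrix : List (List String)) : List (Int × Int × Int) :=
  (PySem.List.pyRange 0 matrix.length 1).foldl
    (fun dp i =>
      ((PySem.List.pyRange 0 (PySem.List.pyGetD matrix 0 []).length 1).foldl
        (stepA matrix i) (dp, 0)).1)
    []

-- ===== PORT B =====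
-- the 'k = j; while k >= 0 and row[k] != "0": k -= 1' loop, as structural recursion on j; returns the final k.
def bScan (row : List String) : Nat → Int
  | 0 => if PySem.List.pyGetD row 0 "" ≠ "0" then -1 else 0
  | j + 1 =>
    if PySem.List.pyGetD row ((j : Int) + 1) "" ≠ "0" then bScan row j
    else (j : Int) + 1

def getdp_alt (matrix : List (List String)) : List (Int × Int × Int) :=
  match matrix with
  | [] => []
  | r0 :: _ =>
    (List.range matrix.length).flatMap (fun (i : Nat) =>
      let row := PySem.List.pyGetD matrix (i : Int) []
      (List.range r0.length).map (fun (j : Nat) =>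
        ((i : Int), (j : Int), (j : Int) - bScan row j)))

-- ===== PRECONDITION & SPEC =====
-- Pre_ excludes exactly the ragged matrices on which Python A raises IndexError
-- (some row shorter than the first row); A returns normally everywhere else.
def Pre_getdp (matrix : List (List String)) : Prop :=
  ∀ row ∈ matrix, (matrix.headD []).length ≤ row.length
instance (matrix : List (List String)) : Decidable (Pre_getdp matrix) := by unfold Pre_getdp; infer_instance

def pvWitness_getdp : List (List String) := [["1", "0", "1"], ["1", "1", "x"]]

def Spec_getdp (matrix : List (List String)) (out : List (Int × Int × Int)) : Prop := out = getdp_alt matrix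
instance (matrix : List (List String)) (out : List (Int × Int × Int)) : Decidable (Spec_getdp matrix out) := by unfold Spec_getdp; infer_instance

-- ===== CLAIM (what is proved, stated in full; the proofs are below) =====
def Claim_equal_getdp : Prop := ∀ (matrix : List (List String)), Dom_getdp matrix → Pre_getdp matrix → Spec_getdp matrix (getdp matrix)

-- ===== LEMMAS AND PROOFS =====

-- the value A's running counter holds after processing column j of row `row`
def cnt (row : List String) : Nat → Int
  | 0 => if PySem.List.pyGetD row 0 "" = "0" then 0 else 1
  | j + 1 => if PySem.List.pyGetD row ((j : Int) + 1) "" = "0" then 0 else cnt row j + 1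

-- A's inner fold over a row, started at any (acc, c0), produces the cnt values appended in order
lemma foldA_row (matrix : List (List String)) (i : Int) (m : Nat)
    (acc : List (Int × Int × Int)) (c0 : Int) :
    (PySem.List.pyRange 0 (m : Int) 1).foldl (stepA matrix i) (acc, c0)
    = (acc ++ (List.range m).map
        (fun (j : Nat) => (i, (j : Int), cnt (PySem.List.pyGetD matrix i []) j)),
       if m = 0 then c0 else cnt (PySem.List.pyGetD matrix i []) (m - 1)) := by
  induction m generalizing acc c0 with
  | zero => simp [PySem.List.pyRange_one_eq_nil]
  | succ n ih =>
    rw [show (((n + 1 : Nat)) : Int) = (n : Int) + 1 by push_cast; ring,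
        PySem.List.pyRange_one_succ_right (by omega : (0 : Int) ≤ n),
        List.foldl_append, ih]
    rcases Nat.eq_zero_or_pos n with h | h
    · subst h
      simp [List.range_succ, cnt, stepA]
    · have hn : (n : Int) ≠ 0 := by omega
      simp only [List.foldl_cons, List.foldl_nil, stepA, if_neg hn]
      have hcnt : cnt (PySem.List.pyGetD matrix i []) n
          = if PySem.List.pyGetD (PySem.List.pyGetD matrix i []) ((n - 1 : Nat) + 1 : Int) "" = "0"
            then 0 else cnt (PySem.List.pyGetD matrix i []) (n - 1) + 1 := by
        conv_lhs => rw [show n = (n - 1) + 1 by omega]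
        rfl
      have hcast : ((n - 1 : Nat) : Int) + 1 = (n : Int) := by omega
      rw [hcast] at hcnt
      simp only [if_neg (show ¬ n = 0 by omega), ← hcnt]
      simp [List.range_succ]

-- A's counter equals B's backward-scan length at every column
lemma cnt_eq_bScan (row : List String) (j : Nat) :
    cnt row j = (j : Int) - bScan row j := by
  induction j with
  | zero =>
    by_cases h : PySem.List.pyGetD row 0 "" = "0" <;> simp [cnt, bScan, h]
  | succ n ih =>
    by_cases h : PySem.List.pyGetD row ((n : Int) + 1) "" = "0"
    · simp [cnt, bScan, h]
    · simp only [cnt, bScan, if_neg h, if_pos h, ih]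
      push_cast
      ring

-- ===== VERDICT (by name: the statement is the Claim_ definition above) =====
theorem getdp_spec : Claim_equal_getdp := by
  intro matrix _ _
  unfold Spec_getdp getdp getdp_alt
  have hfun : (fun (dp : List (Int × Int × Int)) (i : Int) =>
      ((PySem.List.pyRange 0 ((PySem.List.pyGetD matrix 0 []).length : Int) 1).foldl
        (stepA matrix i) (dp, 0)).1)
      = fun dp i => dp ++ (List.range (PySem.List.pyGetD matrix 0 []).length).map
          (fun (j : Nat) => (i, (j : Int), cnt (PySem.List.pyGetD matrix i []) j)) := by
    funext dp i
    rw [foldA_row]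
  rw [hfun, PySem.List.foldl_append_eq_flatMap]
  cases matrix with
  | nil => simp [PySem.List.pyRange_one_eq_nil]
  | cons r0 rest =>
    rw [PySem.List.pyRange_one]
    simp [List.flatMap_map, cnt_eq_bScan, PySem.List.pyGetD_zero_cons]
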